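-- pv_equiv track=rewrite | github.com/wichern/photo-sorter | sort.py | __iso6709
-- ===== SOURCE A (Python) =====
-- from typing import List
--
-- def __iso6709(val: str) -> List[str]:
--     ''' Convert ISO-6709 Geolocation string into list of latitude, longitude, height. '''
--     ret = []
--     part = ''
--     for char in val:
--         if char in ('+', '-') and part != '':
--             ret.append(part)
--             part = ''
--         part += char
--
--     if part != '':
--         if part.endswith('/'):
--             part = part[:-1]
--         ret.append(part)
--
--     return ret
-- ===== SOURCE B (Python) =====
-- from typing import List
--
-- def __iso6709(val: str) -> List[str]:
--     ''' Convert ISO-6709 Geolocation string into list of latitude, longitude, height. '''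
--     tokens = []
--     i = 0
--     n = len(val)
--     while i < n:
--         j = i + 1
--         while j < n and val[j] not in '+-':
--             j += 1
--         tokens.append(val[i:j])
--         i = j
--     if tokens and tokens[-1].endswith('/'):
--         tokens[-1] = tokens[-1][:-1]
--     return tokens
-- ===== Notes on version B (the rewrite author's own statement) =====
-- stated objective: alternative
-- what changed: B replaces A's char-by-char accumulator (appending the pending part whenever a sign char closes it) by a boundary-jump tokenizer that scans for the next '+'/'-' and slices each whole token out, fixing the trailing '/' on the last token afterwards instead of at append time.
import Mathlib
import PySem

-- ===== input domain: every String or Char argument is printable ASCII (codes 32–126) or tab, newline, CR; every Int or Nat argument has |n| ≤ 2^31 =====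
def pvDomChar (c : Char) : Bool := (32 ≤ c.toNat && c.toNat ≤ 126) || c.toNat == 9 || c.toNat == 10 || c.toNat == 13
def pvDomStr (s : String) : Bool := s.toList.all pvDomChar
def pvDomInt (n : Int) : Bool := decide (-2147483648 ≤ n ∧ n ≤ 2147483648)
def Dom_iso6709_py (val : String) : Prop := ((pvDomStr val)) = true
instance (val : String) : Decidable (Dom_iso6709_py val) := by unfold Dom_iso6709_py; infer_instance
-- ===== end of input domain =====

-- B tokenizes by jumping from sign-boundary to sign-boundary and slicing whole tokens,
-- instead of A's char-by-char accumulator; objective: alternative decomposition.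

-- ===== PORT A =====
-- one loop step of A: close the part on '+'/'-' (if nonempty), then extend with the char
def isoStepA (st : List (List Char) × List Char) (c : Char) : List (List Char) × List Char :=
  if (c == '+' || c == '-') && !st.2.isEmpty then (st.1 ++ [st.2], [c])
  else (st.1, st.2 ++ [c])

def iso6709_py (val : String) : List String :=
  let st := val.toList.foldl isoStepA ([], [])
  let ret :=
    if st.2 = [] then st.1
    else st.1 ++ [if st.2.getLast? = some '/' then st.2.dropLast else st.2]
  ret.map String.ofList

-- ===== PORT B =====
def isoNonSign (c : Char) : Bool := !(c == '+' || c == '-')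

-- B's outer loop: each token is the boundary char plus the run up to the next '+'/'-'
-- (the inner `while j < n and val[j] not in '+-'` scan = takeWhile/dropWhile)
def isoTokens : List Char → List (List Char)
  | [] => []
  | c :: rest => (c :: rest.takeWhile isoNonSign) :: isoTokens (rest.dropWhile isoNonSign)
termination_by l => l.length
decreasing_by
  have := List.length_dropWhile_le (p := isoNonSign) (l := rest)
  simp; omega

def isoStrip (t : List Char) : List Char :=
  if t.getLast? = some '/' then t.dropLast else t

-- B's in-place `tokens[-1] = tokens[-1][:-1]` on the last token
def isoFixLast : List (List Char) → List (List Char)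
  | [] => []
  | [t] => [isoStrip t]
  | t :: ts => t :: isoFixLast ts

def iso6709_py_alt (val : String) : List String :=
  (isoFixLast (isoTokens val.toList)).map String.ofList

-- ===== PRECONDITION & SPEC =====
def Spec_iso6709_py (val : String) (out : List String) : Prop := out = iso6709_py_alt val
instance (val : String) (out : List String) : Decidable (Spec_iso6709_py val out) := by unfold Spec_iso6709_py; infer_instance

-- ===== CLAIM (what is proved, stated in full; the proofs are below) =====
def Claim_equal_iso6709_py : Prop := ∀ (val : String), Dom_iso6709_py val → Spec_iso6709_py val (iso6709_py val)

-- ===== LEMMAS AND PROOFS =====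

-- tokens of A's fold, starting from a (nonempty) open part
def isoTokens' (part : List Char) (l : List Char) : List (List Char) :=
  (part ++ l.takeWhile isoNonSign) :: isoTokens (l.dropWhile isoNonSign)

lemma isoTokens_cons (c : Char) (rest : List Char) :
    isoTokens (c :: rest) = isoTokens' [c] rest := by
  simp [isoTokens, isoTokens']

-- invariant of A's fold: accumulated parts are exactly the tokens, split as dropLast/last
lemma foldA_eq (l : List Char) : ∀ (ret : List (List Char)) (part : List Char), part ≠ [] →
    l.foldl isoStepA (ret, part) =
      (ret ++ (isoTokens' part l).dropLast, (isoTokens' part l).getLastD []) := by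
  induction l with
  | nil =>
    intro ret part h
    simp [isoTokens', isoTokens]
  | cons c l ih =>
    intro ret part h
    by_cases hc : (c == '+' || c == '-') = true
    · have hns : isoNonSign c = false := by simp [isoNonSign, hc]
      have step : isoStepA (ret, part) c = (ret ++ [part], [c]) := by
        simp [isoStepA, hc, h]
      have htok : isoTokens' part (c :: l) = part :: isoTokens' [c] l := by
        simp [isoTokens', List.takeWhile, List.dropWhile, hns, isoTokens_cons]
      rw [List.foldl_cons, step, ih (ret ++ [part]) [c] (by simp), htok]
      have hne : isoTokens' [c] l ≠ [] := by simp [isoTokens']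
      have h1 : (part :: isoTokens' [c] l).dropLast = part :: (isoTokens' [c] l).dropLast :=
        List.dropLast_cons_of_ne_nil hne
      have h2 : (part :: isoTokens' [c] l).getLastD [] = (isoTokens' [c] l).getLastD [] := by
        cases h' : isoTokens' [c] l with
        | nil => exact absurd h' hne
        | cons a as => simp
      rw [h1, h2]; simp
    · have hns : isoNonSign c = true := by simp [isoNonSign] at hc ⊢; exact hc
      have hc' : (c == '+' || c == '-') = false := by simpa using hc
      have step : isoStepA (ret, part) c = (ret, part ++ [c]) := by
        simp [isoStepA, hc']
      have htok : isoTokens' part (c :: l) = isoTokens' (part ++ [c]) l := by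
        simp [isoTokens', List.takeWhile, List.dropWhile, hns]
      rw [List.foldl_cons, step, ih ret (part ++ [c]) (by simp), htok]

-- every last token is nonempty
lemma isoTokens_getLastD_ne_nil : ∀ (l : List Char), l ≠ [] →
    (isoTokens l).getLastD [] ≠ [] := by
  intro l
  induction l using isoTokens.induct with
  | case1 => intro h; exact absurd rfl h
  | case2 c rest ih =>
    intro _
    rw [isoTokens]
    cases h' : isoTokens (rest.dropWhile isoNonSign) with
    | nil => simp
    | cons a as =>
      have hne : rest.dropWhile isoNonSign ≠ [] := by
        intro hh; rw [hh] at h'; simp [isoTokens] at h'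
      have := ih hne
      rw [h'] at this
      simpa [List.getLastD] using this

lemma isoFixLast_eq (ts : List (List Char)) (h : ts ≠ []) :
    isoFixLast ts = ts.dropLast ++ [isoStrip (ts.getLastD [])] := by
  induction ts with
  | nil => exact absurd rfl h
  | cons t ts ih =>
    cases ts with
    | nil => simp [isoFixLast]
    | cons u us =>
      have h2 : (u :: us) ≠ [] := by simp
      rw [show isoFixLast (t :: u :: us) = t :: isoFixLast (u :: us) from rfl, ih h2]
      rw [List.dropLast_cons_of_ne_nil h2]
      simp

lemma iso_main (l : List Char) :
    (if (l.foldl isoStepA ([], [])).2 = [] then (l.foldl isoStepA ([], [])).1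
     else (l.foldl isoStepA ([], [])).1 ++
       [if (l.foldl isoStepA ([], [])).2.getLast? = some '/' then
          (l.foldl isoStepA ([], [])).2.dropLast else (l.foldl isoStepA ([], [])).2])
    = isoFixLast (isoTokens l) := by
  cases l with
  | nil => simp [isoTokens, isoFixLast]
  | cons c l =>
    have step0 : isoStepA ([], []) c = ([], [c]) := by simp [isoStepA]
    have hfold := foldA_eq l [] [c] (by simp)
    rw [List.foldl_cons, step0, hfold]
    simp only [← isoTokens_cons]
    have hne : isoTokens (c :: l) ≠ [] := by simp [isoTokens]
    have hlast : (isoTokens (c :: l)).getLastD [] ≠ [] :=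
      isoTokens_getLastD_ne_nil (c :: l) (by simp)
    rw [if_neg hlast, isoFixLast_eq _ hne]
    simp [isoStrip]

-- ===== VERDICT (by name: the statement is the Claim_ definition above) =====
theorem iso6709_py_spec : Claim_equal_iso6709_py := by
  intro val _
  unfold Spec_iso6709_py iso6709_py iso6709_py_alt
  exact congrArg (List.map String.ofList) (iso_main val.toList)
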